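-- pv_equiv track=rewrite | github.com/aleksarashova/UserAuthentication | Project1MOPR/zad1.py | check_dimensions
-- ===== SOURCE A (Python) =====
-- def check_dimensions(model):
--     dimensions = None
--     for word, vector in model.items():
--         if dimensions is None:
--             dimensions = len(vector)
--         else:
--             if len(vector) != dimensions:
--                 return False
--     return True
-- ===== SOURCE B (Python) =====
-- def check_dimensions(model):
--     lengths = [len(v) for v in model.values()]
--     return not lengths or min(lengths) == max(lengths)
-- ===== Notes on version B (the rewrite author's own statement) =====
-- stated objective: alternative
-- what changed: B builds the list of all vector lengths and checks its minimum equals its maximum, replacing A's stateful first-vs-rest loop with early return by two extremal aggregations with no reference element.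
import Mathlib
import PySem

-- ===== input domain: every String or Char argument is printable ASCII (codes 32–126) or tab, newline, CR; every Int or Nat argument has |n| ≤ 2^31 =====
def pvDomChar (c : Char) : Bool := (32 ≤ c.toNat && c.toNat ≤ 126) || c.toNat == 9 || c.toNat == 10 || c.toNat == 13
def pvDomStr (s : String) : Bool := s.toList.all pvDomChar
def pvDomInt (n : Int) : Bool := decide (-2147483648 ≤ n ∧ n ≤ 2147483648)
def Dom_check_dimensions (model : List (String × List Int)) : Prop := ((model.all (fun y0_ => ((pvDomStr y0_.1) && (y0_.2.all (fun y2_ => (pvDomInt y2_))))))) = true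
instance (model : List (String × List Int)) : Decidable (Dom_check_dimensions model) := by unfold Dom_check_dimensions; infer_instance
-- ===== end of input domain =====

-- B checks min(lengths) == max(lengths) over all vector lengths (alternative: two extremal aggregations, no reference element, no early exit), instead of A's stateful first-vs-rest loop with early return.


-- ===== PORT A =====
-- the 'for word, vector in model.items()' loop, threading the 'dimensions' variable (None → Option)
def chkLoopA : List (String × List Int) → Option Int → Bool
  | [], _ => true
  | (_, v) :: rest, none => chkLoopA rest (some (v.length : Int))
  | (_, v) :: rest, some d => if (v.length : Int) ≠ d then false else chkLoopA rest (some d)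

def check_dimensions (model : List (String × List Int)) : Bool :=
  chkLoopA model none

-- ===== PORT B =====
-- lengths = [len(v) for v in model.values()]; return not lengths or min(lengths) == max(lengths)
def check_dimensions_alt (model : List (String × List Int)) : Bool :=
  let lengths := model.map (fun p => (p.2.length : Int))
  lengths.isEmpty || (PySem.List.min? lengths (fun x => x) == PySem.List.max? lengths (fun x => x))

-- ===== PRECONDITION & SPEC =====
def Spec_check_dimensions (model : List (String × List Int)) (out : Bool) : Prop := out = check_dimensions_alt model
instance (model : List (String × List Int)) (out : Bool) : Decidable (Spec_check_dimensions model out) := by unfold Spec_check_dimensions; infer_instance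

-- ===== CLAIM (what is proved, stated in full; the proofs are below) =====
def Claim_equal_check_dimensions : Prop := ∀ (model : List (String × List Int)), Dom_check_dimensions model → Spec_check_dimensions model (check_dimensions model)

-- ===== LEMMAS AND PROOFS =====
theorem chkLoopA_some (rest : List (String × List Int)) (d : Int) :
    chkLoopA rest (some d) = rest.all (fun p => (p.2.length : Int) == d) := by
  induction rest with
  | nil => rfl
  | cons p rest ih =>
    obtain ⟨w, v⟩ := p
    simp only [chkLoopA, List.all_cons, ih]
    by_cases h : (v.length : Int) = d <;> simp [h]

theorem foldl_min_le (xs : List Int) (d : Int) : xs.foldl min d ≤ d := by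
  induction xs generalizing d with
  | nil => simp
  | cons x xs ih => exact le_trans (ih (min d x)) (min_le_left d x)

theorem le_foldl_max (xs : List Int) (d : Int) : d ≤ xs.foldl max d := by
  induction xs generalizing d with
  | nil => simp
  | cons x xs ih => exact le_trans (le_max_left d x) (ih (max d x))

theorem foldl_min_le_mem (xs : List Int) (d x : Int) (hx : x ∈ xs) : xs.foldl min d ≤ x := by
  induction xs generalizing d with
  | nil => cases hx
  | cons y ys ih =>
    cases hx with
    | head => exact le_trans (foldl_min_le ys (min d x)) (min_le_right d x)
    | tail _ h => exact ih (min d y) h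

theorem mem_le_foldl_max (xs : List Int) (d x : Int) (hx : x ∈ xs) : x ≤ xs.foldl max d := by
  induction xs generalizing d with
  | nil => cases hx
  | cons y ys ih =>
    cases hx with
    | head => exact le_trans (le_max_right d x) (le_foldl_max ys (max d x))
    | tail _ h => exact ih (max d y) h

theorem foldl_min_const (xs : List Int) (d : Int) (h : ∀ x ∈ xs, x = d) : xs.foldl min d = d := by
  induction xs with
  | nil => rfl
  | cons x xs ih =>
    have hx := h x (List.mem_cons_self ..)
    subst hx
    simp only [List.foldl_cons, min_self]
    exact ih (fun y hy => h y (List.mem_cons_of_mem _ hy))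

theorem foldl_max_const (xs : List Int) (d : Int) (h : ∀ x ∈ xs, x = d) : xs.foldl max d = d := by
  induction xs with
  | nil => rfl
  | cons x xs ih =>
    have hx := h x (List.mem_cons_self ..)
    subst hx
    simp only [List.foldl_cons, max_self]
    exact ih (fun y hy => h y (List.mem_cons_of_mem _ hy))

theorem minmax_eq_iff (xs : List Int) (d : Int) :
    xs.foldl min d = xs.foldl max d ↔ ∀ x ∈ xs, x = d := by
  constructor
  · intro h x hx
    have h1 := foldl_min_le xs d
    have h2 := le_foldl_max xs d
    have h3 := foldl_min_le_mem xs d x hx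
    have h4 := mem_le_foldl_max xs d x hx
    omega
  · intro h
    rw [foldl_min_const xs d h, foldl_max_const xs d h]

-- ===== VERDICT (by name: the statement is the Claim_ definition above) =====
theorem check_dimensions_spec : Claim_equal_check_dimensions := by
  intro model _
  unfold Spec_check_dimensions check_dimensions check_dimensions_alt
  cases model with
  | nil => decide
  | cons p rest =>
    obtain ⟨w, v⟩ := p
    simp only [chkLoopA, List.map_cons, List.isEmpty_cons, Bool.false_or,
      PySem.List.min?_id_cons, PySem.List.max?_id_cons]
    rw [chkLoopA_some, Bool.eq_iff_iff]
    simp only [List.all_eq_true, beq_iff_eq, Option.some_inj, Prod.forall]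
    rw [minmax_eq_iff]
    constructor
    · rintro h x hx
      obtain ⟨⟨a, b⟩, hmem, rfl⟩ := List.mem_map.mp hx
      exact h a b hmem
    · intro h a b hmem
      exact h _ (List.mem_map.mpr ⟨(a, b), hmem, rfl⟩)
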